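-- pv_equiv track=rewrite | github.com/fonsp/project-euler | Problem 104/program.py | lastDigitsPandigital
-- ===== SOURCE A (Python) =====
-- def lastDigitsPandigital(n):
--     occured = [True] + [False]*9
--     for i in range(9):
--         digit = n % 10
--         if occured[digit]:
--             return False
--         occured[digit] = True
--         n //= 10
--     return True
-- ===== SOURCE B (Python) =====
-- def lastDigitsPandigital(n):
--     m = n % 10**9
--     digits = [m // 10**k % 10 for k in range(9)]
--     return sorted(digits) == list(range(1, 10))
-- ===== Notes on version B (the rewrite author's own statement) =====
-- stated objective: simpler
-- what changed: B reduces n modulo one billion to grab the last nine digits at once, builds the digit list by positional division, and tests that the sorted digits are exactly one through nine, replacing A's one-digit-at-a-time loop over a mutable seen-array with early exits.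
import Mathlib
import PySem

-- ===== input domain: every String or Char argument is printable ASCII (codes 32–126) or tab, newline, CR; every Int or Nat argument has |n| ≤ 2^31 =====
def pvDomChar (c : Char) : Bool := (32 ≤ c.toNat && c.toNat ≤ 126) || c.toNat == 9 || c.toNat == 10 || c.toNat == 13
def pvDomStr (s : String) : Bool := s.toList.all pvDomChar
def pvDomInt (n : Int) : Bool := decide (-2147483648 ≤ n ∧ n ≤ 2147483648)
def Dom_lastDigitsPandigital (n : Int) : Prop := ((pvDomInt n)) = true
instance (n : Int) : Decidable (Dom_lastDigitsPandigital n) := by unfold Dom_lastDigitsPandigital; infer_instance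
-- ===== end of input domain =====

-- B builds the list of the last nine digits once and tests sorted(digits) == [1..9],
-- instead of A's per-digit early-exit scan over a seen-array; objective: simpler, same O(1) cost.

-- ===== PORT A =====
-- the for-loop with its two early returns, as structural recursion on the remaining iterations
def lastDigitsPandigitalLoop : List Bool → Int → Nat → Bool
  | _, _, 0 => true
  | occured, n, fuel + 1 =>
    let digit := PySem.Int.mod n 10
    match PySem.List.pyGet? occured digit with
    | none => false   -- IndexError; unreachable: 0 ≤ n % 10 < 10 = len(occured)
    | some b =>
      if b then false
      else lastDigitsPandigitalLoop (PySem.List.pySetD occured digit true)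
             (PySem.Int.floordiv n 10) fuel

def lastDigitsPandigital (n : Int) : Bool :=
  lastDigitsPandigitalLoop (true :: List.replicate 9 false) n 9

-- ===== PORT B =====
def lastDigitsPandigital_alt (n : Int) : Bool :=
  let m := PySem.Int.mod n (10 ^ 9)
  let digits := (PySem.List.pyRange 0 9 1).map
    (fun k => PySem.Int.mod (PySem.Int.floordiv m (10 ^ k.toNat)) 10)
  PySem.List.sorted digits (fun x => x) == PySem.List.pyRange 1 10 1

-- ===== PRECONDITION & SPEC =====
def Spec_lastDigitsPandigital (n : Int) (out : Bool) : Prop := out = lastDigitsPandigital_alt n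
instance (n : Int) (out : Bool) : Decidable (Spec_lastDigitsPandigital n out) := by unfold Spec_lastDigitsPandigital; infer_instance

-- ===== CLAIM (what is proved, stated in full; the proofs are below) =====
def Claim_equal_lastDigitsPandigital : Prop := ∀ (n : Int), Dom_lastDigitsPandigital n → Spec_lastDigitsPandigital n (lastDigitsPandigital n)

-- ===== LEMMAS AND PROOFS =====

-- the k-th decimal digit (from the right), Euclidean = Python's floor div/mod since both divisors are positive
def pvDig (n : Int) (k : Nat) : Int := n / 10 ^ k % 10

theorem pvDig_nonneg (n : Int) (k : Nat) : 0 ≤ pvDig n k :=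
  Int.emod_nonneg _ (by norm_num)

theorem pvDig_lt (n : Int) (k : Nat) : pvDig n k < 10 :=
  Int.emod_lt_of_pos _ (by norm_num)

theorem pvDig_shift (n : Int) (k : Nat) : pvDig (n / 10) k = pvDig n (k + 1) := by
  unfold pvDig
  rw [Int.ediv_ediv_of_nonneg (by norm_num : (0:Int) ≤ 10), pow_succ, mul_comm]


theorem pvDig_mod_pow (n : Int) (k : Nat) (hk : k < 9) :
    pvDig (n % 10 ^ 9) k = pvDig n k := by
  unfold pvDig
  obtain ⟨c, hc⟩ : ∃ c : Nat, 9 = k + (c + 1) := ⟨8 - k, by omega⟩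
  have hpow : (10:Int) ^ k * (10 ^ c * 10) = 10 ^ 9 := by rw [hc, pow_add, pow_succ]
  set q := n / 10 ^ 9 with hq
  have h2 : (10:Int) ^ c * 10 ^ k * 10 = 1000000000 := by
    rw [mul_comm ((10:Int) ^ c), mul_assoc, hpow]; norm_num
  have hmod : n % 10 ^ 9 = n + (-(10 ^ c * 10 * q)) * 10 ^ k := by
    rw [Int.emod_def, hc, pow_add, pow_succ, hpow, ← hq]
    linear_combination q * h2
  rw [hmod, Int.add_mul_ediv_right _ _ (by positivity : (10:Int) ^ k ≠ 0)]
  have h3 : n / 10 ^ k + -(10 ^ c * 10 * q) = n / 10 ^ k + (-(10 ^ c * q)) * 10 := by ring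
  rw [h3, Int.add_mul_emod_self_right]

-- invariant of A's loop: it returns True iff the next `fuel` digits are pairwise
-- distinct and none of them is already marked in `occured`
theorem loop_true_iff (occured : List Bool) (hlen : occured.length = 10)
    (n : Int) (fuel : Nat) :
    lastDigitsPandigitalLoop occured n fuel = true ↔
      ((List.range fuel).map (pvDig n)).Nodup ∧
      ∀ k < fuel, occured.getD (pvDig n k).toNat false = false := by
  induction fuel generalizing occured n with
  | zero => simp [lastDigitsPandigitalLoop]
  | succ fuel ih =>
    have hd0 : PySem.Int.mod n 10 = pvDig n 0 := by
      rw [PySem.Int.mod_eq_emod_of_pos (by norm_num)]; unfold pvDig; norm_num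
    have hd_nonneg : 0 ≤ pvDig n 0 := pvDig_nonneg n 0
    have hd_lt : pvDig n 0 < 10 := pvDig_lt n 0
    have hdt : (pvDig n 0).toNat < occured.length := by omega
    have hget : PySem.List.pyGet? occured (pvDig n 0) = some occured[(pvDig n 0).toNat] :=
      PySem.List.pyGet?_eq_some_getElem occured hd_nonneg (by omega)
    have hshift : (List.range (fuel + 1)).map (pvDig n)
        = pvDig n 0 :: (List.range fuel).map (fun k => pvDig n (k + 1)) := by
      rw [List.range_succ_eq_map, List.map_cons, List.map_map]; rfl
    have hfloor : PySem.Int.floordiv n 10 = n / 10 :=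
      PySem.Int.floordiv_eq_ediv_of_pos (by norm_num)
    have hsplit : (∀ k < fuel + 1, occured.getD (pvDig n k).toNat false = false)
        ↔ occured.getD (pvDig n 0).toNat false = false
          ∧ ∀ k < fuel, occured.getD (pvDig n (k + 1)).toNat false = false := by
      constructor
      · exact fun h => ⟨h 0 (by omega), fun k hk => h (k + 1) (by omega)⟩
      · rintro ⟨h0, hs⟩ k hk
        cases k with
        | zero => exact h0
        | succ k => exact hs k (by omega)
    show lastDigitsPandigitalLoop occured n (fuel + 1) = true ↔ _
    rw [lastDigitsPandigitalLoop]
    simp only [hd0, hget, hfloor]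
    by_cases hocc : occured[(pvDig n 0).toNat] = true
    · simp only [hocc, if_true]
      constructor
      · intro h; exact absurd h (by simp)
      · rintro ⟨-, hall⟩
        have := hall 0 (by omega)
        rw [List.getD_eq_getElem _ _ hdt] at this
        simp [hocc] at this
    · rw [Bool.not_eq_true] at hocc
      simp only [hocc, Bool.false_eq_true, if_false]
      rw [ih _ (by rw [PySem.List.pySetD_of_nonneg occured true hd_nonneg]; simpa using hlen)]
      have hshift2 : ∀ k : Nat, pvDig (n / 10) k = pvDig n (k + 1) := pvDig_shift n
      have hmap2 : (List.range fuel).map (pvDig (n / 10))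
          = (List.range fuel).map (fun k => pvDig n (k + 1)) :=
        List.map_congr_left (fun k _ => hshift2 k)
      have hset : ∀ j : Nat, j < 10 →
          ((PySem.List.pySetD occured (pvDig n 0) true).getD j false
            = if j = (pvDig n 0).toNat then true else occured.getD j false) := by
        intro j hj
        rw [PySem.List.pySetD_of_nonneg occured true hd_nonneg]
        rcases eq_or_ne j ((pvDig n 0).toNat) with h | h
        · subst h
          rw [List.getD_eq_getElem _ _ (by simpa [hlen] using hdt), if_pos rfl,
            List.getElem_set_self]
        · rw [if_neg h]
          rw [List.getD_eq_getElem _ _ (by simp [hlen]; omega),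
            List.getD_eq_getElem _ _ (by omega), List.getElem_set_ne (by omega)]
      rw [hshift, hsplit, hmap2, List.nodup_cons]
      simp only [hshift2]
      have hmem : pvDig n 0 ∈ (List.range fuel).map (fun k => pvDig n (k + 1))
          ↔ ∃ k < fuel, pvDig n (k + 1) = pvDig n 0 := by
        simp [List.mem_map]
      constructor
      · rintro ⟨hnd, hall⟩
        have hne : ∀ k < fuel, pvDig n (k + 1) ≠ pvDig n 0 := by
          intro k hk heq
          have := hall k hk
          rw [hset _ (by have := pvDig_lt n (k + 1); have := pvDig_nonneg n (k + 1); omega),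
            heq, if_pos rfl] at this
          exact Bool.false_ne_true this.symm
        refine ⟨⟨by rw [hmem]; rintro ⟨k, hk, heq⟩; exact hne k hk heq, hnd⟩,
          by rw [List.getD_eq_getElem _ _ hdt]; exact hocc, ?_⟩
        intro k hk
        have := hall k hk
        rw [hset _ (by have := pvDig_lt n (k + 1); have := pvDig_nonneg n (k + 1); omega)] at this
        split at this
        · exact absurd this (by simp)
        · exact this
      · rintro ⟨⟨hnotmem, hnd⟩, h0, hall⟩
        refine ⟨hnd, ?_⟩
        intro k hk
        rw [hset _ (by have := pvDig_lt n (k + 1); have := pvDig_nonneg n (k + 1); omega)]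
        have hne : (pvDig n (k + 1)).toNat ≠ (pvDig n 0).toNat := by
          intro heq
          apply hnotmem
          rw [hmem]
          refine ⟨k, hk, ?_⟩
          have h1 := pvDig_nonneg n (k + 1)
          rw [← Int.toNat_of_nonneg h1, ← Int.toNat_of_nonneg hd_nonneg, heq]
        rw [if_neg hne]
        exact hall k hk

-- characterisation of A
theorem portA_true_iff (n : Int) :
    lastDigitsPandigital n = true ↔
      ((List.range 9).map (pvDig n)).Nodup ∧ ∀ k < 9, pvDig n k ≠ 0 := by
  unfold lastDigitsPandigital
  rw [loop_true_iff _ (by simp) n 9]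
  refine and_congr_right fun _ => ?_
  refine forall₂_congr fun k hk => ?_
  have h0 := pvDig_nonneg n k
  have h1 := pvDig_lt n k
  constructor
  · intro h he
    rw [he] at h
    simp at h
  · intro hne
    have hj : (pvDig n k).toNat ≠ 0 ∧ (pvDig n k).toNat < 10 := by omega
    rcases hj with ⟨hj0, hj9⟩
    interval_cases h : (pvDig n k).toNat <;> simp_all

-- characterisation of B
-- B's sorted-digits test, characterised: sorted(l) == [1..9] iff l has no duplicate and no zero
theorem sorted_eq_range_iff (l : List Int) (hlen : l.length = 9)
    (hlb : ∀ x ∈ l, 0 ≤ x) (hub : ∀ x ∈ l, x < 10) :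
    PySem.List.sorted l (fun x => x) = [1,2,3,4,5,6,7,8,9] ↔ l.Nodup ∧ (0:Int) ∉ l := by
  constructor
  · intro h
    have hperm : ([1,2,3,4,5,6,7,8,9] : List Int).Perm l :=
      h ▸ PySem.List.sorted_perm l (fun x => x) false
    refine ⟨hperm.nodup_iff.mp (by decide), fun h0 => ?_⟩
    have := hperm.mem_iff.mpr h0
    simp at this
  · rintro ⟨hnd, h0⟩
    have hmemIcc : ∀ x ∈ l, x ∈ Finset.Icc (1:Int) 9 := by
      intro x hx
      have hb1 := hlb x hx
      have hb2 := hub x hx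
      have hb3 : x ≠ 0 := fun he => h0 (he ▸ hx)
      rw [Finset.mem_Icc]; omega
    have hsub : l.toFinset ⊆ Finset.Icc (1:Int) 9 :=
      fun x hx => hmemIcc x (List.mem_toFinset.mp hx)
    have hcard : l.toFinset.card = 9 := by rw [List.toFinset_card_of_nodup hnd, hlen]
    have hIcc : (Finset.Icc (1:Int) 9).card = 9 := by simp [Int.card_Icc]
    have heq : l.toFinset = Finset.Icc 1 9 :=
      Finset.eq_of_subset_of_card_le hsub (by omega)
    have hpm : ([1,2,3,4,5,6,7,8,9] : List Int).Perm l := by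
      rw [List.perm_ext_iff_of_nodup (by decide) hnd]
      intro a
      constructor
      · intro ha
        have haI : a ∈ Finset.Icc (1:Int) 9 := by
          rw [Finset.mem_Icc]; simp at ha; omega
        exact List.mem_toFinset.mp (heq ▸ haI)
      · intro ha
        have haI := heq ▸ List.mem_toFinset.mpr ha
        rw [Finset.mem_Icc] at haI
        simp; omega
    exact PySem.List.sorted_eq_of_perm_of_pairwise_lt l [1,2,3,4,5,6,7,8,9] (fun x => x) hpm (by decide)

theorem portB_true_iff (n : Int) :
    lastDigitsPandigital_alt n = true ↔
      ((List.range 9).map (pvDig n)).Nodup ∧ ∀ k < 9, pvDig n k ≠ 0 := by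
  have he : ∀ c : Nat, c < 9 →
      PySem.Int.mod (PySem.Int.floordiv (PySem.Int.mod n (10 ^ 9)) (10 ^ c)) 10 = pvDig n c := by
    intro c hc
    rw [PySem.Int.mod_eq_emod_of_pos (by norm_num : (0:Int) < 10 ^ 9),
      PySem.Int.floordiv_eq_ediv_of_pos (by positivity),
      PySem.Int.mod_eq_emod_of_pos (by norm_num)]
    exact pvDig_mod_pow n c hc
  have hdg : ((PySem.List.pyRange 0 9 1).map
        (fun k => PySem.Int.mod (PySem.Int.floordiv (PySem.Int.mod n (10 ^ 9)) (10 ^ k.toNat)) 10))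
      = (List.range 9).map (pvDig n) := by
    rw [PySem.List.pyRange_one, List.map_map]
    have h90 : ((9:Int) - 0).toNat = 9 := rfl
    rw [h90]
    apply List.map_congr_left
    intro k hk
    simp only [Function.comp]
    rw [zero_add, Int.toNat_natCast]
    exact he k (List.mem_range.mp hk)
  have hL : lastDigitsPandigital_alt n
      = (PySem.List.sorted ((List.range 9).map (pvDig n)) (fun x => x) == PySem.List.pyRange 1 10 1) := by
    unfold lastDigitsPandigital_alt
    simp only [hdg]
  rw [hL, (by decide : PySem.List.pyRange 1 10 1 = ([1,2,3,4,5,6,7,8,9] : List Int)),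
    beq_iff_eq,
    sorted_eq_range_iff _ (by simp)
      (by intro x hx; simp [List.mem_map] at hx; obtain ⟨k, -, hk⟩ := hx; exact hk ▸ pvDig_nonneg n k)
      (by intro x hx; simp [List.mem_map] at hx; obtain ⟨k, -, hk⟩ := hx; exact hk ▸ pvDig_lt n k)]
  refine and_congr_right fun _ => ?_
  simp only [List.mem_map, List.mem_range, not_exists, not_and]

-- ===== VERDICT (by name: the statement is the Claim_ definition above) =====
theorem lastDigitsPandigital_spec : Claim_equal_lastDigitsPandigital := by
  intro n _
  unfold Spec_lastDigitsPandigital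
  have := (portA_true_iff n).trans (portB_true_iff n).symm
  cases hA : lastDigitsPandigital n <;> cases hB : lastDigitsPandigital_alt n <;>
    simp_all
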